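/- PORTED by tools/port_fixed.py from Prog/Jsmn/D/PrimLoop.lean to THE FIXED IMAGE fixed/jsmn_d.bin (same bytes at the same addresses; binFD). Do not edit: edit the original and port again. -/
/-
  jsmn_d.bin: `jsmn_parse_primitive` (174 bytes at 100086H, 62 instructions), first part: the prologue and the scanning loop.
    prim_prologue   100086H → loop head 1000AFH                                  (8 instructions)
    prim_bodyA      1000AFH → found 1000DEH | range check 1000A2H                (the loop test and the `switch`: 24 instructions)
    prim_bodyB      1000A2H → JSMN_ERROR_INVAL 100116H | loop head 1000AFH       (5 instructions)
  Between the cut points the state is described by `PrimFrame` (what stays true up to the `ret`: saved registers, stack slots, the parser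
  and the tokens in memory, the footprint) and `PrimRegs` (the registers that hold the arguments during the loop).
-/
import Prog.Jsmn.Fixed.Specs
import Prog.Jsmn.State
import Prog.Jsmn.Fixed.CodeFD
import X86.Derived.Prog.MemWords
import Prog.Jsmn.D.PrimLemmas

namespace X86
namespace J6
namespace FD
open X86.User (CodeAt RegsKept Span FlagsOK Layout toNat_add_ofNat toNat_ofNat_lt' add_ofNat_add)
open Jsmn JsmnFDBytes

set_option maxRecDepth 100000
set_option maxHeartbeats 4000000
set_option linter.unusedSimpArgs false
set_option linter.unusedVariables false

/-- What holds from the end of the prologue to the epilogue: rbx = parser, ebp = start, the two pushed registers in their slots, the return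
address, the image; the parser struct holds `pc` and the token array `tc` (the CURRENT model state; `p`, `toks` are those on entry);
nothing was written outside the contract's windows. -/
structure PrimFrame (v0 : User.State) (ret pa tb : Word) (numTokens : Nat) (p : Parser) (toks : Option Tokens) (pc : Parser)
    (tc : Option Tokens) (v : User.State) : Prop where
  rbx : v.reg .rbx = pa
  rbp : v.reg .rbp = UInt64.ofNat p.pos
  rsp : v.reg .rsp = v0.reg .rsp - 16
  r12 : v.reg .r12 = v0.reg .r12
  r13 : v.reg .r13 = v0.reg .r13
  r14 : v.reg .r14 = v0.reg .r14
  r15 : v.reg .r15 = v0.reg .r15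
  slotRbp : UInt64.ofNat (v.mem.readLE (v0.reg .rsp - 8) 8) = v0.reg .rbp
  slotRbx : UInt64.ofNat (v.mem.readLE (v0.reg .rsp - 16) 8) = v0.reg .rbx
  retA : UInt64.ofNat (v.mem.readLE (v0.reg .rsp) 8) = ret
  img : CodeAt v.mem 0x100000 image_bytes
  parser : ParserAt v.mem pa pc
  toksArg : ToksArg Config.default v.mem tb numTokens tc
  tcb : toksBytes Config.default numTokens tc = toksBytes Config.default numTokens toks
  same : SameOutside v0.mem v.mem
    [((v0.reg .rsp).toNat - 24, (v0.reg .rsp).toNat), (pa.toNat, pa.toNat + 12),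
      (tb.toNat, tb.toNat + toksBytes Config.default numTokens toks)]

/-- The argument registers during the loop: rdi = len, r8 = num_tokens, r9 = js, r10 = tokens; the text is in memory. -/
structure PrimRegs (jsA tb : Word) (js : List UInt8) (numTokens : Nat) (v : User.State) : Prop where
  rdi : v.reg .rdi = UInt64.ofNat js.length
  r8 : v.reg .r8 = UInt64.ofNat numTokens
  r9 : v.reg .r9 = jsA
  r10 : v.reg .r10 = tb
  text : CodeAt v.mem jsA js

variable {n : User.Layout} {v0 : User.State} {ret pa jsA tb : Word} {js : List UInt8} {numTokens : Nat} {p pc : Parser} {toks tc : Option Tokens}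

/-- `PrimFrame` after instructions that wrote only scratch registers. -/
theorem PrimFrame.regs {v v' : User.State} (h : PrimFrame v0 ret pa tb numTokens p toks pc tc v) (hk : RegsKept [.rax, .rcx, .rdx, .rsi] v v')
    (hm : v'.mem = v.mem) : PrimFrame v0 ret pa tb numTokens p toks pc tc v' :=
  ⟨(hk.get .rbx rfl).trans h.rbx, (hk.get .rbp rfl).trans h.rbp, (hk.get .rsp rfl).trans h.rsp, (hk.get .r12 rfl).trans h.r12,
    (hk.get .r13 rfl).trans h.r13, (hk.get .r14 rfl).trans h.r14, (hk.get .r15 rfl).trans h.r15, hm ▸ h.slotRbp, hm ▸ h.slotRbx, hm ▸ h.retA,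
    hm ▸ h.img, hm ▸ h.parser, hm ▸ h.toksArg, h.tcb, hm ▸ h.same⟩

/-- `PrimRegs` after instructions that wrote only scratch registers. -/
theorem PrimRegs.regs {v v' : User.State} (h : PrimRegs jsA tb js numTokens v) (hk : RegsKept [.rax, .rcx, .rdx, .rsi] v v')
    (hm : v'.mem = v.mem) : PrimRegs jsA tb js numTokens v' :=
  ⟨(hk.get .rdi rfl).trans h.rdi, (hk.get .r8 rfl).trans h.r8, (hk.get .r9 rfl).trans h.r9, (hk.get .r10 rfl).trans h.r10, hm ▸ h.text⟩

/-- The prologue: push rbp, rbx; the arguments moved to rbx, r9, rdi, r10; `start = parser->pos` in ebp. -/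
theorem prim_prologue (hp : ScanPre binFD n binFD.prim binFD.usePrim v0 ret pa jsA tb js numTokens p toks)
    (hr8 : v0.reg .r8 = UInt64.ofNat numTokens) :
    Reach n v0 (fun v => v.rip = 0x1000af ∧ PrimFrame v0 ret pa tb numTokens p toks p toks v ∧ PrimRegs jsA tb js numTokens v) := by
  have hW := hp.toksW
  v3_open hp hW
  j6f_bin
  have hcode := JsmnFD.tjfd_jsmn_parse_primitive_code hp_call_img
  v3_walk hcode hp.call.fetch [] until [0x1000af]
  have hplt : p.pos < 2 ^ 32 := hp_parser_pos ▸ User.Mem.readLE4_lt _ _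
  rw [Word.low32_ofNat_of_lt hplt]
  refine Reach.done ⟨by simp, ?_, ?_⟩
  · exact ⟨by v3_regnorm, by v3_regnorm, by v3_regnorm, by v3_regnorm, by v3_regnorm, by v3_regnorm, by v3_regnorm, by v3_read, by v3_read,
      by v3_frame hp_call_retAddr, by v3_frame hp_call_img, by v3_frame hp.parser, by v3_frame hp_toksArg, rfl, by v3_same⟩
  · exact ⟨by v3_regnorm, by v3_regnorm; exact hr8, by v3_regnorm, by v3_regnorm, by v3_frame hp_text⟩

/-- Bit `c` of the mask 400100100002600H, as the machine tests it (`movabs rsi, mask ; shr rsi, cl ; test sil, 1`). -/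
theorem bit_test (c : Nat) (h0 : 0 < c) (hc : c < 64) :
    UInt64.toNat ((Word.shift .shr .w64 0x400100100002600 (Word.low .w8 (UInt64.ofNat c))) &&& 1) % 256 =
      (0x400100100002600 >>> c) % 2 := by
  have hk : (Word.low .w8 (UInt64.ofNat c) &&& 0x3F).toNat = c := by
    have h1 : (Word.low .w8 (UInt64.ofNat c)).toNat = c := by word_omega
    rw [UInt64.toNat_and, h1]
    show c &&& 63 = c
    exact Nat.and_two_pow_sub_one_eq_mod c 6 ▸ Nat.mod_eq_of_lt hc
  rw [Word.shift_shr64_val _ _ c hk h0 hc, UInt64.toNat_and, UInt64.toNat_shiftRight]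
  have h2 : (UInt64.ofNat c).toNat % 64 = c := by word_omega
  rw [h2]
  show ((0x400100100002600 >>> c) &&& 1) % 256 = _
  rw [Nat.and_one_is_mod]
  omega

/-- The bits of the mask: tab, LF, CR, space, comma, colon. -/
theorem mask_bits : ∀ c, c < 64 → ((0x400100100002600 >>> c) % 2 = 1 ↔ (c = 9 ∨ c = 10 ∨ c = 13 ∨ c = 32 ∨ c = 44 ∨ c = 58)) := by
  decide

/-- The loop test and the `switch`, from the loop head with `parser->pos = q`: either `found` is reached (the loop test failed, or the
character stops the primitive), or the range check, with the character in ecx. Only scratch registers change. -/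
theorem prim_bodyA (hp : ScanPre binFD n binFD.prim binFD.usePrim v0 ret pa jsA tb js numTokens p toks) {q : Nat} {v : User.State}
    (hrip : v.rip = 0x1000af) (hf : PrimFrame v0 ret pa tb numTokens p toks { p with pos := q } tc v) (hr : PrimRegs jsA tb js numTokens v) :
    Reach n v (fun v' => RegsKept [.rax, .rcx, .rdx, .rsi] v v' ∧ v'.mem = v.mem ∧ v'.reg .rax = UInt64.ofNat q ∧
      ((v'.rip = 0x1000de ∧ (more js q = false ∨ (more js q = true ∧ primStop Config.default (charAt js q) = true))) ∨
       (v'.rip = 0x1000a2 ∧ v'.reg .rcx = UInt64.ofNat (charAt js q).toNat ∧ more js q = true ∧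
         primStop Config.default (charAt js q) = false))) := by
  have hjs := hp.env.jsR
  have hpr := hp.env.parserR
  v3_open hp.call hp.jslt hf.rbx hf.img hf.parser hr hjs hpr
  j6f_bin
  have hcode := JsmnFD.tjfd_jsmn_parse_primitive_code hf_img
  have hqlt : q < 2 ^ 32 := hf_parser_pos ▸ User.Mem.readLE4_lt _ _
  have hlq := Word.low32_ofNat_of_lt (n := q) hqlt
  by_cases hq : q < js.length
  · have hch := text_read hr_text q hq
    obtain ⟨c, hc⟩ : ∃ c, c = (charAt js q).toNat := ⟨_, rfl⟩
    have hclt : c < 256 := hc ▸ (charAt js q).toNat_lt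
    rw [← hc] at hch ⊢
    have hlc := Word.low32_ofNat_of_lt (n := c) (by omega)
    have hlc8 : Word.low .w8 (UInt64.ofNat c) = UInt64.ofNat c := by word_omega
    v3_walk hcode hp.call.fetch [hlq, hlc, hlc8] until [0x1000de, 0x1000a2]
    · exact Reach.done ⟨by v3_kept, by simp, by v3_regnorm, Or.inl ⟨by simp, Or.inl (more_false_of_nul (by rw [← hc]; v3_omega))⟩⟩
    all_goals have hmore := more_true hq (by rw [← hc]; v3_omega)
    · exact Reach.done ⟨by v3_kept, by simp, by v3_regnorm, Or.inl ⟨by simp, Or.inr ⟨hmore, (primStop_default_iff _).mpr (by rw [← hc]; v3_omega)⟩⟩⟩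
    · exact Reach.done ⟨by v3_kept, by simp, by v3_regnorm, Or.inl ⟨by simp, Or.inr ⟨hmore, (primStop_default_iff _).mpr (by rw [← hc]; v3_omega)⟩⟩⟩
    · exact Reach.done ⟨by v3_kept, by simp, by v3_regnorm, Or.inr ⟨by simp, by v3_regnorm, hmore, primStop_default_not _ (by rw [← hc]; v3_omega)⟩⟩
    · exact Reach.done ⟨by v3_kept, by simp, by v3_regnorm, Or.inr ⟨by simp, by v3_regnorm, hmore, primStop_default_not _ (by rw [← hc]; v3_omega)⟩⟩
    all_goals have hc9 : 9 ≤ c ∧ c ≤ 58 := by v3_omega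
    all_goals have hb := bit_test c (by omega) (by omega)
    all_goals rw [hlc8] at hb
    all_goals have hmb := mask_bits c (by omega)
    all_goals rw [hb] at hbr_1000dc
    · exact Reach.done ⟨by v3_kept, by simp, by v3_regnorm, Or.inr ⟨by simp, by v3_regnorm, hmore, primStop_default_not _ (by rw [← hc]; omega)⟩⟩
    · exact Reach.done ⟨by v3_kept, by simp, by v3_regnorm, Or.inl ⟨by simp, Or.inr ⟨hmore, (primStop_default_iff _).mpr (by rw [← hc]; omega)⟩⟩⟩
  · have hmore := more_false_of_len (js := js) (pos := q) (by omega)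
    v3_walk hcode hp.call.fetch [hlq] until [0x1000de, 0x1000a2]
    exact Reach.done ⟨by v3_kept, by simp, by v3_regnorm, Or.inl ⟨by simp, Or.inl hmore⟩⟩

/-- The range check and the loop increment, from 1000A2H with the character `c` in ecx and `parser->pos = q` in eax: either the character
is out of range (100116H, nothing but scratch registers changed), or `parser->pos = q + 1` is stored and the loop head is reached. -/
theorem prim_bodyB (hp : ScanPre binFD n binFD.prim binFD.usePrim v0 ret pa jsA tb js numTokens p toks) {q c : Nat} {v : User.State}
    (hrip : v.rip = 0x1000a2) (hf : PrimFrame v0 ret pa tb numTokens p toks { p with pos := q } toks v) (hr : PrimRegs jsA tb js numTokens v)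
    (hrax : v.reg .rax = UInt64.ofNat q) (hrcx : v.reg .rcx = UInt64.ofNat c) (hc : c < 256) :
    Reach n v (fun v' =>
      (v'.rip = 0x100116 ∧ RegsKept [.rax, .rcx, .rdx, .rsi] v v' ∧ v'.mem = v.mem ∧ (c < 32 ∨ 127 ≤ c)) ∨
      (v'.rip = 0x1000af ∧ PrimFrame v0 ret pa tb numTokens p toks { p with pos := u32 ((q : Int) + 1) } toks v' ∧
        PrimRegs jsA tb js numTokens v' ∧ 32 ≤ c ∧ c < 127)) := by
  have hW := hp.toksW
  v3_open hp hf hr hW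
  j6f_bin
  have hcode := JsmnFD.tjfd_jsmn_parse_primitive_code hf_img
  have hqlt : q < 2 ^ 32 := hf_parser_pos ▸ User.Mem.readLE4_lt _ _
  v3_walk hcode hp.call.fetch [] until [0x100116, 0x1000af]
  · exact Reach.done (Or.inl ⟨by simp, by v3_kept, by simp, by v3_omega⟩)
  · have hpos : u32 ((q : Int) + 1) = (Word.low .w32 (UInt64.ofNat q + 1)).toNat := by unfold u32; v3_omega
    refine Reach.done (Or.inr ⟨by simp, ?_, ?_, by v3_omega, by v3_omega⟩)
    · exact ⟨by v3_regnorm; exact hf_rbx, by v3_regnorm; exact hf_rbp, by v3_regnorm; exact hf_rsp, by v3_regnorm; exact hf_r12, by v3_regnorm; exact hf_r13,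
        by v3_regnorm; exact hf_r14, by v3_regnorm; exact hf_r15, by v3_frame hf_slotRbp, by v3_frame hf_slotRbx, by v3_frame hf_retA,
        by v3_frame hf_img, ⟨by rw [hpos]; v3_read, by v3_frame hf_parser_toknext, by v3_frame hf_parser_toksuper⟩, by v3_frame hf_toksArg,
        rfl, by v3_same⟩
    · exact ⟨by v3_regnorm; exact hr_rdi, by v3_regnorm; exact hr_r8, by v3_regnorm; exact hr_r9, by v3_regnorm; exact hr_r10, by v3_frame hr_text⟩

end FD
end J6
end X86
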